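-- pv_equiv track=rewrite | github.com/joneiros/python-sandbox | starters/diamond/diamond.py | getDiamond
-- ===== SOURCE A (Python) =====
-- def getDiamond(vradius):
--     linesToPrint = []
--     stars = 1
--     padding = vradius - stars
--
--     for n in range(1, vradius * 2):
--         line = " " * padding + "*" * stars
--         linesToPrint.append(line)
--
--         if n < vradius:
--             padding -= 1
--             stars += 2
--         else:
--             padding += 1
--             stars -= 2
--
--     return linesToPrint
-- ===== SOURCE B (Python) =====
-- def getDiamond(vradius):
--     w = 2 * vradius - 1
--     return [" " * abs(vradius - 1 - i) + "*" * (w - 2 * abs(vradius - 1 - i))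
--             for i in range(w)]
-- ===== Notes on version B (the rewrite author's own statement) =====
-- stated objective: simpler
-- what changed: Replaced A's stateful loop carrying stars/padding with a direction-flipping branch by a stateless comprehension computing each row directly from its distance to the centre.
import Mathlib
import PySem

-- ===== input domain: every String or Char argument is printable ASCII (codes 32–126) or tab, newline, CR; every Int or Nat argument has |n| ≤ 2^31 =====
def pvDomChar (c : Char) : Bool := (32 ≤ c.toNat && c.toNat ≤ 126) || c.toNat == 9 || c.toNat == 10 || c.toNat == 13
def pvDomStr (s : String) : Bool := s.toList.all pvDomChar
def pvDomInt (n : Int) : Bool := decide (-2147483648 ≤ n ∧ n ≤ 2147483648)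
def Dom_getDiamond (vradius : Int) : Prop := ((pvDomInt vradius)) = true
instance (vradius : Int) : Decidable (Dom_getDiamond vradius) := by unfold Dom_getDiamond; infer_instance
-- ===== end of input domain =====

-- B replaces A's stateful loop (carried stars/padding mutated by a direction branch) by a
-- stateless closed-form comprehension from the row's distance to the centre: objective 'simpler'.

-- ===== PORT A =====
-- '" " * p + "*" * s' (Python str*int, negative count = empty): exact, built on List Char.
def getDiamond_mkLine (padding stars : Int) : String :=
  String.ofList (List.replicate padding.toNat ' ' ++ List.replicate stars.toNat '*')

-- the body of A's for-loop, state = (linesToPrint, stars, padding)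
def getDiamond_step (vradius : Int) (st : List String × Int × Int) (n : Int) :
    List String × Int × Int :=
  let line := getDiamond_mkLine st.2.2 st.2.1
  let lines := st.1 ++ [line]
  if n < vradius then (lines, st.2.1 + 2, st.2.2 - 1)
  else (lines, st.2.1 - 2, st.2.2 + 1)

def getDiamond (vradius : Int) : List String :=
  ((PySem.List.pyRange 1 (vradius * 2) 1).foldl (getDiamond_step vradius)
    ([], 1, vradius - 1)).1

-- ===== PORT B =====
def getDiamond_alt (vradius : Int) : List String :=
  let w := 2 * vradius - 1
  (PySem.List.pyRange 0 w 1).map (fun i =>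
    getDiamond_mkLine |vradius - 1 - i| (w - 2 * |vradius - 1 - i|))

-- ===== PRECONDITION & SPEC =====
def Spec_getDiamond (vradius : Int) (out : List String) : Prop := out = getDiamond_alt vradius
instance (vradius : Int) (out : List String) : Decidable (Spec_getDiamond vradius out) := by unfold Spec_getDiamond; infer_instance

-- ===== CLAIM (what is proved, stated in full; the proofs are below) =====
def Claim_equal_getDiamond : Prop := ∀ (vradius : Int), Dom_getDiamond vradius → Spec_getDiamond vradius (getDiamond vradius)

-- ===== LEMMAS AND PROOFS =====

-- loop invariant: before iteration n the state is stars = 2v-1-2|v-n|, padding = |v-n|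
lemma getDiamond_loop (v : Int) (m : Nat) :
    ∀ (n : Int) (acc : List String), (2 * v - n).toNat = m →
    ((PySem.List.pyRange n (v * 2) 1).foldl (getDiamond_step v)
        (acc, 2 * v - 1 - 2 * |v - n|, |v - n|)).1
    = acc ++ (PySem.List.pyRange (n - 1) (2 * v - 1) 1).map (fun i =>
        getDiamond_mkLine |v - 1 - i| (2 * v - 1 - 2 * |v - 1 - i|)) := by
  induction m with
  | zero =>
    intro n acc hm
    have hba : v * 2 ≤ n := by omega
    have hba' : 2 * v - 1 ≤ n - 1 := by omega
    rw [PySem.List.pyRange_one_eq_nil hba, PySem.List.pyRange_one_eq_nil hba']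
    simp
  | succ k ih =>
    intro n acc hm
    have hlt : n < v * 2 := by omega
    have hlt' : n - 1 < 2 * v - 1 := by omega
    rw [PySem.List.pyRange_one_cons hlt, PySem.List.pyRange_one_cons hlt']
    have habs : v - 1 - (n - 1) = v - n := by ring
    simp only [List.foldl_cons, List.map_cons, habs]
    have hstep : getDiamond_step v (acc, 2 * v - 1 - 2 * |v - n|, |v - n|) n
        = (acc ++ [getDiamond_mkLine |v - n| (2 * v - 1 - 2 * |v - n|)],
           2 * v - 1 - 2 * |v - (n + 1)|, |v - (n + 1)|) := by
      simp only [getDiamond_step]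
      by_cases h : v ≤ n
      · rw [abs_of_nonpos (show v - n ≤ 0 by omega),
            abs_of_nonpos (show v - (n + 1) ≤ 0 by omega)]
        simp only [if_neg (show ¬ n < v by omega)]
        refine Prod.ext ?_ (Prod.ext ?_ ?_) <;> simp <;> ring
      · rw [abs_of_nonneg (show (0:Int) ≤ v - n by omega),
            abs_of_nonneg (show (0:Int) ≤ v - (n + 1) by omega)]
        simp only [if_pos (show n < v by omega)]
        refine Prod.ext ?_ (Prod.ext ?_ ?_) <;> simp <;> ring
    rw [hstep, ih (n + 1) _ (by omega)]
    have hr : n + 1 - 1 = n := by ring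
    rw [hr]
    simp

-- ===== VERDICT (by name: the statement is the Claim_ definition above) =====
theorem getDiamond_spec : Claim_equal_getDiamond := by
  intro v _
  simp only [Spec_getDiamond, getDiamond, getDiamond_alt]
  by_cases hv : v ≤ 0
  · rw [PySem.List.pyRange_one_eq_nil (by omega : v * 2 ≤ 1),
        PySem.List.pyRange_one_eq_nil (by omega : 2 * v - 1 ≤ 0)]
    simp
  · have h1 : |v - 1| = v - 1 := abs_of_nonneg (by omega)
    have := getDiamond_loop v (2 * v - 1).toNat 1 [] (by omega)
    rw [h1] at this
    have h2 : 2 * v - 1 - 2 * (v - 1) = 1 := by ring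
    rw [h2] at this
    simpa using this
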